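-- pv_equiv track=rewrite | github.com/sarmamydhili/creativity-sessions | backend/app/services/perspective_pool_allocation.py | compute_tool_counts
-- ===== SOURCE A (Python) =====
-- import math
-- from typing import Final
--
-- TOOLS_ORDER: Final[tuple[str, ...]] = (
--     "analogy",
--     "recategorization",
--     "combination",
--     "association",
-- )
--
-- def _max_per_tool(n: int) -> int:
--     """
--     Upper bound per tool: at least ceil(n/4) so a balanced split is possible,
--     and at least floor(35% * n) when that is feasible for larger pools.
--     """
--     if n <= 0:
--         return 0
--     min_for_balance = (n + len(TOOLS_ORDER) - 1) // len(TOOLS_ORDER)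
--     pct_cap = max(1, math.floor(n * 0.35 + 1e-9))
--     return max(min_for_balance, pct_cap)
--
-- def compute_tool_counts(n: int) -> dict[str, int]:
--     """
--     Balanced integer counts per tool, each <= floor(0.35 * n), summing to n.
--     """
--     n = max(0, min(n, 32))
--     if n == 0:
--         return {t: 0 for t in TOOLS_ORDER}
--     cap = _max_per_tool(n)
--     base, rem = divmod(n, len(TOOLS_ORDER))
--     counts = {t: base for t in TOOLS_ORDER}
--     for i in range(rem):
--         counts[TOOLS_ORDER[i]] += 1
--     while any(counts[t] > cap for t in TOOLS_ORDER):
--         over = [t for t in TOOLS_ORDER if counts[t] > cap]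
--         under = [t for t in TOOLS_ORDER if counts[t] < cap]
--         if not over or not under:
--             break
--         counts[over[0]] -= 1
--         counts[under[0]] += 1
--     if n >= len(TOOLS_ORDER):
--         while any(counts[t] == 0 for t in TOOLS_ORDER):
--             donor = max(TOOLS_ORDER, key=lambda t: counts[t])
--             receiver = next(t for t in TOOLS_ORDER if counts[t] == 0)
--             if counts[donor] <= 1:
--                 break
--             counts[donor] -= 1
--             counts[receiver] += 1
--     return counts
-- ===== SOURCE B (Python) =====
-- TOOLS_ORDER = (
--     "analogy",
--     "recategorization",
--     "combination",
--     "association",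
-- )
--
-- def compute_tool_counts(n: int) -> dict[str, int]:
--     """Round-robin: deal the n clamped units one at a time over the tools."""
--     n = max(0, min(n, 32))
--     counts = {t: 0 for t in TOOLS_ORDER}
--     for i in range(n):
--         counts[TOOLS_ORDER[i % len(TOOLS_ORDER)]] += 1
--     return counts
-- ===== Notes on version B (the rewrite author's own statement) =====
-- stated objective: simpler
-- what changed: B replaces the divmod even-split plus the two (dead, given the 0..32 clamp) rebalancing while-loops by a single round-robin pass that deals the n units one at a time over the tools.
import Mathlib
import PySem

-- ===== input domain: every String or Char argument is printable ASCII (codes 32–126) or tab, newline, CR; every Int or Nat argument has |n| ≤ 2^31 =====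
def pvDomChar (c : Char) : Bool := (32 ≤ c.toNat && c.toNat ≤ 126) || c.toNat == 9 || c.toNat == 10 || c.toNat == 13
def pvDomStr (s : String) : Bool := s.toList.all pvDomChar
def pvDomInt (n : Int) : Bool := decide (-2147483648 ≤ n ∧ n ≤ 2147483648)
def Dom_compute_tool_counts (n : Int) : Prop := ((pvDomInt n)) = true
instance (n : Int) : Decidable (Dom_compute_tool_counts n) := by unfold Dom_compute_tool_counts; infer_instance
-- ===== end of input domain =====

-- B replaces the divmod split + dead rebalancing loops by one round-robin dealing pass (objective: simpler).
-- ===== PORT A =====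
def pvTools : List String := ["analogy", "recategorization", "combination", "association"]

-- _max_per_tool; math.floor(n * 0.35 + 1e-9) = (35*n) // 100 exactly for every n in 1..32,
-- the only values this helper is called on (n is clamped before the call).
def pvMaxPerTool (n : Int) : Int :=
  if n ≤ 0 then 0
  else
    let min_for_balance := PySem.Int.floordiv (n + 4 - 1) 4
    let pct_cap := max 1 (PySem.Int.floordiv (35 * n) 100)
    max min_for_balance pct_cap

-- first while-loop (cap rebalance), fuel-bounded transliteration
def pvCapLoop (cap : Int) (fuel : Nat) (d : PySem.Dict String Int) : PySem.Dict String Int :=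
  match fuel with
  | 0 => d
  | fuel + 1 =>
    if pvTools.any (fun t => d.getD t 0 > cap) then
      let ovr := pvTools.filter (fun t => decide (d.getD t 0 > cap))
      let undr := pvTools.filter (fun t => decide (d.getD t 0 < cap))
      match ovr, undr with
      | o :: _, u :: _ => pvCapLoop cap fuel ((d.modify o 0 (· - 1)).modify u 0 (· + 1))
      | _, _ => d
    else d

-- second while-loop (zero fix-up), fuel-bounded transliteration
def pvZeroLoop (fuel : Nat) (d : PySem.Dict String Int) : PySem.Dict String Int :=
  match fuel with
  | 0 => d
  | fuel + 1 =>
    if pvTools.any (fun t => d.getD t 0 == 0) then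
      match PySem.List.max? pvTools (key := fun t => d.getD t 0), pvTools.find? (fun t => d.getD t 0 == 0) with
      | some donor, some receiver =>
        if d.getD donor 0 ≤ 1 then d
        else pvZeroLoop fuel ((d.modify donor 0 (· - 1)).modify receiver 0 (· + 1))
      | _, _ => d
    else d

def pvBodyA (n : Int) : List (String × Int) :=
  if n = 0 then pvTools.map (fun t => (t, (0 : Int)))
  else
    let cap := pvMaxPerTool n
    let base := PySem.Int.floordiv n 4
    let rem := PySem.Int.mod n 4
    let counts := pvTools.foldl (fun d t => d.insert t base) PySem.Dict.empty
    let counts := (PySem.List.pyRange 0 rem 1).foldl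
      (fun d i => match PySem.List.pyGet? pvTools i with
        | some t => d.modify t 0 (· + 1)   -- key always present; i < rem < 4 so the index is in range
        | none => d) counts
    let counts := pvCapLoop cap 100 counts
    let counts := if n ≥ 4 then pvZeroLoop 100 counts else counts
    counts.items

def compute_tool_counts (n : Int) : List (String × Int) :=
  pvBodyA (max 0 (min n 32))

-- ===== PORT B =====
def pvToolsB : List String := ["analogy", "recategorization", "combination", "association"]

def pvBodyB (n : Int) : List (String × Int) :=
  let counts := pvToolsB.foldl (fun d t => d.insert t (0 : Int)) PySem.Dict.empty
  let counts := (PySem.List.pyRange 0 n 1).foldl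
    (fun d i => match PySem.List.pyGet? pvToolsB (PySem.Int.mod i 4) with
      | some t => d.modify t 0 (· + 1)   -- i % 4 is always in range
      | none => d) counts
  counts.items

def compute_tool_counts_alt (n : Int) : List (String × Int) :=
  pvBodyB (max 0 (min n 32))

-- ===== PRECONDITION & SPEC =====
def Spec_compute_tool_counts (n : Int) (out : List (String × Int)) : Prop := out = compute_tool_counts_alt n
instance (n : Int) (out : List (String × Int)) : Decidable (Spec_compute_tool_counts n out) := by unfold Spec_compute_tool_counts; infer_instance

-- ===== CLAIM (what is proved, stated in full; the proofs are below) =====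
def Claim_equal_compute_tool_counts : Prop := ∀ (n : Int), Dom_compute_tool_counts n → Spec_compute_tool_counts n (compute_tool_counts n)

-- ===== LEMMAS AND PROOFS =====

-- ===== VERDICT (by name: the statement is the Claim_ definition above) =====
theorem pvBody_eq : ∀ k : Fin 33, pvBodyA (k : Int) = pvBodyB (k : Int) := by decide

theorem compute_tool_counts_spec : Claim_equal_compute_tool_counts := by
  intro n _
  unfold Spec_compute_tool_counts compute_tool_counts compute_tool_counts_alt
  have h0 : 0 ≤ max 0 (min n 32) := le_max_left _ _
  have h32 : max 0 (min n 32) ≤ 32 := max_le (by norm_num) (min_le_right _ _)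
  obtain ⟨k, hk⟩ : ∃ k : Fin 33, max 0 (min n 32) = (k : Int) :=
    ⟨⟨(max 0 (min n 32)).toNat, by omega⟩, by show max 0 (min n 32) = ((max 0 (min n 32)).toNat : Int); omega⟩
  rw [hk]
  exact pvBody_eq k
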